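-- pv_equiv track=rewrite | github.com/CarlaBuongiorno/packard_snowflake | snowflake.py | snowflake
-- ===== SOURCE A (Python) =====
-- from copy import deepcopy
--
-- def snowflake(number_of_generations):
--     grid_size = number_of_generations*2-1
--     center = number_of_generations-1
--
--     if number_of_generations > 0: # To pass empty grid test
--         grid = build_grid(grid_size)
--         grid[center][center] = 1 # center is 1
--
--         count = 2
--         while count <= number_of_generations:
--             new_grid = deepcopy(grid) # old grid doesnt change
--             for y in range(len(grid)):
--                 for x in range(len(grid)):
--                     if should_cell_be_filled_in(grid, y, x):
--                         new_grid[y][x] = 1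
--
--                     # if check_one_touches_one(grid, y, x):
--                     #     new_grid[y][x] = 1
--             count += 1
--             grid = new_grid
--         return grid
--     else:
--         return []
--
-- def build_grid(grid_size):
--     grid = []
--     for i in range(grid_size):
--         grid.append([0 for i in range(grid_size)])
--     return grid
--
-- def should_cell_be_filled_in(grid, y, x):
--     if is_given_cell_filled_in(grid, y, x):
--         return True
--     return check_if_only_1_neighbour_is_filled_in(grid, y, x)
--
-- def is_given_cell_filled_in(grid, y, x):
--     return (y >= 0 and y < len(grid) and x >= 0 and x < len(grid)) and grid[y][x] == 1
--
-- def check_if_only_1_neighbour_is_filled_in(grid, y, x):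
--     return sum([is_given_cell_filled_in(grid, y-1, x),
--         is_given_cell_filled_in(grid, y+1, x),
--         is_given_cell_filled_in(grid, y, x-1),
--         is_given_cell_filled_in(grid, y, x+1)]) == 1
-- ===== SOURCE B (Python) =====
-- def snowflake(number_of_generations):
--     n = number_of_generations
--     if n <= 0:
--         return []
--     size = 2 * n - 1
--     c = n - 1
--     filled = {(c, c)}
--     deltas = ((-1, 0), (1, 0), (0, -1), (0, 1))
--     for _ in range(n - 1):
--         candidates = set()
--         for (y, x) in filled:
--             for (dy, dx) in deltas:
--                 ny, nx = y + dy, x + dx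
--                 if 0 <= ny < size and 0 <= nx < size and (ny, nx) not in filled:
--                     candidates.add((ny, nx))
--         new = set()
--         for (y, x) in candidates:
--             cnt = sum(((y + dy, x + dx) in filled) for dy, dx in deltas)
--             if cnt == 1:
--                 new.add((y, x))
--         filled |= new
--     return [[1 if (y, x) in filled else 0 for x in range(size)] for y in range(size)]
-- ===== Notes on version B (the rewrite author's own statement) =====
-- stated objective: faster
-- what changed: B keeps the filled cells as a set and each generation examines only the empty in-bounds neighbours of filled cells (filling those with exactly one filled neighbour), instead of deep-copying the whole grid and re-scanning every cell every generation; the grid is rendered once at the end.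
import Mathlib
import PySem

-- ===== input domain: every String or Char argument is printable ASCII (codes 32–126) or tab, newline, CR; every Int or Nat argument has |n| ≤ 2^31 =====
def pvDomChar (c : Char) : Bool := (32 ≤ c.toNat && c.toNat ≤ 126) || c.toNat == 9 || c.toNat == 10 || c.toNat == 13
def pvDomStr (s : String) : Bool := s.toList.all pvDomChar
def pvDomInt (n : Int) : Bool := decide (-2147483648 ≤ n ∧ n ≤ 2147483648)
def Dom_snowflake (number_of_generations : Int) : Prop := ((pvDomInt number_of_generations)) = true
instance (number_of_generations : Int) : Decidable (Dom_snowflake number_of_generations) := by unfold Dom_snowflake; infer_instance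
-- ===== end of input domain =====

-- B replaces A's per-generation full-grid rescan by a set of filled cells whose empty
-- in-bounds neighbours are the only cells examined each generation (objective: faster).

-- ===== PORT A =====
-- is_given_cell_filled_in: bounds check, then grid[y][x] == 1 (indices are in range
-- after the guard and the grids are square, so the pyGet? chain is exact here).
def pvIsGiven (grid : List (List Int)) (y x : Int) : Bool :=
  (decide (0 ≤ y) && decide (y < (grid.length : Int)) && decide (0 ≤ x) && decide (x < (grid.length : Int)))
  && (((PySem.List.pyGet? grid y).bind (fun row => PySem.List.pyGet? row x)) == some 1)

-- check_if_only_1_neighbour_is_filled_in: sum of the four bools == 1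
def pvCheck1 (grid : List (List Int)) (y x : Int) : Bool :=
  (([pvIsGiven grid (y-1) x, pvIsGiven grid (y+1) x,
     pvIsGiven grid y (x-1), pvIsGiven grid y (x+1)].map
      (fun b => if b then (1:Int) else 0)).sum == 1)

-- should_cell_be_filled_in
def pvShould (grid : List (List Int)) (y x : Int) : Bool :=
  if pvIsGiven grid y x then true else pvCheck1 grid y x

-- build_grid
def pvBuildGrid (grid_size : Int) : List (List Int) :=
  (PySem.List.pyRange 0 grid_size 1).foldl
    (fun g _i => g ++ [(PySem.List.pyRange 0 grid_size 1).map (fun _j => (0:Int))]) []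

-- grid[y][x] = v (all call sites use in-range nonnegative indices, where pySetD/pyGetD are exact)
def pvSetCell (g : List (List Int)) (y x v : Int) : List (List Int) :=
  PySem.List.pySetD g y (PySem.List.pySetD (PySem.List.pyGetD g y []) x v)

-- one generation: deepcopy + the double for-loop over range(len(grid))
def pvStepA (grid : List (List Int)) : List (List Int) :=
  (PySem.List.pyRange 0 (grid.length : Int) 1).foldl (fun ng y =>
    (PySem.List.pyRange 0 (grid.length : Int) 1).foldl (fun ng2 x =>
      if pvShould grid y x then pvSetCell ng2 y x 1 else ng2) ng) grid

-- the while loop: count = 2; while count <= n: …; count += 1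
def pvWhileA (grid : List (List Int)) (count n : Int) : List (List Int) :=
  if count ≤ n then pvWhileA (pvStepA grid) (count + 1) n else grid
termination_by (n + 1 - count).toNat
decreasing_by omega

def snowflake (number_of_generations : Int) : List (List Int) :=
  let grid_size := number_of_generations * 2 - 1
  let center := number_of_generations - 1
  if number_of_generations > 0 then
    pvWhileA (pvSetCell (pvBuildGrid grid_size) center center 1) 2 number_of_generations
  else []

-- ===== PORT B =====
def pvDeltas : List (Int × Int) := [(-1,0),(1,0),(0,-1),(0,1)]

-- 0 <= y < size and 0 <= x < size
def pvInB (size : Int) (p : Int × Int) : Bool :=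
  decide (0 ≤ p.1) && decide (p.1 < size) && decide (0 ≤ p.2) && decide (p.2 < size)

-- candidates: empty in-bounds neighbours of filled cells
def pvCandidates (size : Int) (filled : PySem.Set (Int × Int)) : PySem.Set (Int × Int) :=
  filled.foldl (fun cs p =>
    pvDeltas.foldl (fun cs2 d =>
      if pvInB size (p.1 + d.1, p.2 + d.2) && !(PySem.Set.contains filled (p.1 + d.1, p.2 + d.2))
      then PySem.Set.add cs2 (p.1 + d.1, p.2 + d.2) else cs2) cs)
    PySem.Set.empty

-- cnt = sum((y+dy, x+dx) in filled for …)
def pvCnt (filled : PySem.Set (Int × Int)) (p : Int × Int) : Int :=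
  (pvDeltas.map (fun d =>
    if PySem.Set.contains filled (p.1 + d.1, p.2 + d.2) then (1:Int) else 0)).sum

def pvNewCells (size : Int) (filled : PySem.Set (Int × Int)) : PySem.Set (Int × Int) :=
  (pvCandidates size filled).foldl
    (fun ns p => if pvCnt filled p == 1 then PySem.Set.add ns p else ns) PySem.Set.empty

-- one generation: filled |= new
def pvStepB (size : Int) (filled : PySem.Set (Int × Int)) : PySem.Set (Int × Int) :=
  PySem.Set.union filled (pvNewCells size filled)

-- final comprehension [[1 if (y,x) in filled else 0 …] …]
def pvRender (size : Int) (filled : PySem.Set (Int × Int)) : List (List Int) :=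
  (PySem.List.pyRange 0 size 1).map (fun y =>
    (PySem.List.pyRange 0 size 1).map (fun x =>
      if PySem.Set.contains filled (y, x) then (1:Int) else 0))

def snowflake_alt (number_of_generations : Int) : List (List Int) :=
  if number_of_generations ≤ 0 then [] else
    let size := 2 * number_of_generations - 1
    let c := number_of_generations - 1
    let filled := (PySem.List.pyRange 0 (number_of_generations - 1) 1).foldl
      (fun f _ => pvStepB size f) (PySem.Set.add PySem.Set.empty (c, c))
    pvRender size filled

-- ===== PRECONDITION & SPEC =====
def Spec_snowflake (number_of_generations : Int) (out : List (List Int)) : Prop := out = snowflake_alt number_of_generations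
instance (number_of_generations : Int) (out : List (List Int)) : Decidable (Spec_snowflake number_of_generations out) := by unfold Spec_snowflake; infer_instance

-- ===== CLAIM (what is proved, stated in full; the proofs are below) =====
def Claim_equal_snowflake : Prop := ∀ (number_of_generations : Int), Dom_snowflake number_of_generations → Spec_snowflake number_of_generations (snowflake number_of_generations)

-- ===== LEMMAS AND PROOFS =====

-- proof-only helpers
def pvEntry (g : List (List Int)) (y x : Int) : Int := (g.getD y.toNat []).getD x.toNat 0

def pvGood (size : Int) (S : PySem.Set (Int × Int)) : Prop := ∀ p ∈ S, pvInB size p = true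

def pvIterB (size : Int) : Nat → PySem.Set (Int × Int) → PySem.Set (Int × Int)
  | 0, S => S
  | k+1, S => pvIterB size k (pvStepB size S)

-- ---- generic fold/set facts ----
theorem pv_foldl_const {α β : Type} (g : β → β) (l : List α) (init : β) :
    l.foldl (fun b _ => g b) init = (fun b => g b)^[l.length] init := by
  induction l generalizing init with
  | nil => rfl
  | cons a t ih => simp [List.foldl_cons, ih, Function.iterate_succ_apply]

theorem pv_mem_filterAdd {β : Type} (L : List β) (g : β → Int × Int) (c : β → Bool)
    (init : PySem.Set (Int × Int)) (p : Int × Int) :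
    p ∈ L.foldl (fun s b => if c b then PySem.Set.add s (g b) else s) init ↔
      p ∈ init ∨ ∃ b ∈ L, c b = true ∧ g b = p := by
  induction L generalizing init with
  | nil => simp
  | cons a t ih =>
      simp only [List.foldl_cons]
      by_cases h : c a = true
      · rw [if_pos h, ih]
        simp only [PySem.Set.mem_add, List.mem_cons]
        constructor
        · rintro (⟨h1 | h2⟩ | ⟨b, hb, hc, hg⟩)
          · exact Or.inl h1
          · exact Or.inr ⟨a, Or.inl rfl, h, h2.symm⟩
          · exact Or.inr ⟨b, Or.inr hb, hc, hg⟩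
        · rintro (h1 | ⟨b, (rfl | hb), hc, hg⟩)
          · exact Or.inl (Or.inl h1)
          · exact Or.inl (Or.inr hg.symm)
          · exact Or.inr ⟨b, hb, hc, hg⟩
      · rw [if_neg h, ih]
        simp only [List.mem_cons]
        constructor
        · rintro (h1 | ⟨b, hb, hc, hg⟩)
          · exact Or.inl h1
          · exact Or.inr ⟨b, Or.inr hb, hc, hg⟩
        · rintro (h1 | ⟨b, (rfl | hb), hc, hg⟩)
          · exact Or.inl h1
          · exact absurd hc h
          · exact Or.inr ⟨b, hb, hc, hg⟩

theorem pv_mem_candidates (size : Int) (S : PySem.Set (Int × Int)) (p : Int × Int) :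
    p ∈ pvCandidates size S ↔
      (∃ q ∈ S, ∃ d ∈ pvDeltas, (q.1 + d.1, q.2 + d.2) = p) ∧
        pvInB size p = true ∧ p ∉ S := by
  have inner : ∀ (q : Int × Int) (cs : PySem.Set (Int × Int)),
      p ∈ pvDeltas.foldl (fun cs2 d =>
          if pvInB size (q.1 + d.1, q.2 + d.2) && !(PySem.Set.contains S (q.1 + d.1, q.2 + d.2))
          then PySem.Set.add cs2 (q.1 + d.1, q.2 + d.2) else cs2) cs ↔
        p ∈ cs ∨ ∃ d ∈ pvDeltas,
          ((pvInB size (q.1 + d.1, q.2 + d.2) && !(PySem.Set.contains S (q.1 + d.1, q.2 + d.2))) = true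
            ∧ (q.1 + d.1, q.2 + d.2) = p) := by
    intro q cs
    exact pv_mem_filterAdd pvDeltas (fun d => (q.1 + d.1, q.2 + d.2)) _ cs p
  have outer : ∀ (L : List (Int × Int)) (init : PySem.Set (Int × Int)),
      p ∈ L.foldl (fun cs q =>
          pvDeltas.foldl (fun cs2 d =>
            if pvInB size (q.1 + d.1, q.2 + d.2) && !(PySem.Set.contains S (q.1 + d.1, q.2 + d.2))
            then PySem.Set.add cs2 (q.1 + d.1, q.2 + d.2) else cs2) cs) init ↔
        p ∈ init ∨ ∃ q ∈ L, ∃ d ∈ pvDeltas,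
          ((pvInB size (q.1 + d.1, q.2 + d.2) && !(PySem.Set.contains S (q.1 + d.1, q.2 + d.2))) = true
            ∧ (q.1 + d.1, q.2 + d.2) = p) := by
    intro L
    induction L with
    | nil => simp
    | cons a t ih =>
        intro init
        simp only [List.foldl_cons]
        rw [ih, inner a init]
        simp only [List.mem_cons]
        constructor
        · rintro ((h1 | ⟨d, hd, hc⟩) | ⟨q, hq, hrest⟩)
          · exact Or.inl h1
          · exact Or.inr ⟨a, Or.inl rfl, d, hd, hc⟩
          · exact Or.inr ⟨q, Or.inr hq, hrest⟩
        · rintro (h1 | ⟨q, (rfl | hq), hrest⟩)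
          · exact Or.inl (Or.inl h1)
          · exact Or.inl (Or.inr hrest)
          · exact Or.inr ⟨q, hq, hrest⟩
  unfold pvCandidates
  rw [outer S PySem.Set.empty]
  simp only [PySem.Set.empty, List.not_mem_nil, false_or]
  constructor
  · rintro ⟨q, hq, d, hd, hcond, hp⟩
    rw [hp] at hcond
    rw [Bool.and_eq_true, Bool.not_eq_eq_eq_not, Bool.not_true] at hcond
    obtain ⟨hb, hcon⟩ := hcond
    refine ⟨⟨q, hq, d, hd, hp⟩, hb, ?_⟩
    intro hmem
    have hct := (PySem.Set.contains_iff S p).mpr hmem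
    rw [hcon] at hct
    exact Bool.false_ne_true hct
  · rintro ⟨⟨q, hq, d, hd, hp⟩, hb, hnot⟩
    refine ⟨q, hq, d, hd, ?_, hp⟩
    rw [hp, Bool.and_eq_true, Bool.not_eq_eq_eq_not, Bool.not_true]
    refine ⟨hb, ?_⟩
    rw [Bool.eq_false_iff]
    intro hc
    exact hnot ((PySem.Set.contains_iff S p).mp hc)

theorem pv_mem_newCells (size : Int) (S : PySem.Set (Int × Int)) (p : Int × Int) :
    p ∈ pvNewCells size S ↔ p ∈ pvCandidates size S ∧ pvCnt S p = 1 := by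
  unfold pvNewCells
  rw [pv_mem_filterAdd (pvCandidates size S) (fun b => b) (fun b => pvCnt S b == 1) PySem.Set.empty p]
  simp only [PySem.Set.empty, List.not_mem_nil, false_or, beq_iff_eq]
  constructor
  · rintro ⟨b, hb, hc, rfl⟩; exact ⟨hb, hc⟩
  · rintro ⟨hb, hc⟩; exact ⟨p, hb, hc, rfl⟩

theorem pv_mem_stepB (size : Int) (S : PySem.Set (Int × Int)) (p : Int × Int) :
    p ∈ pvStepB size S ↔ p ∈ S ∨ p ∈ pvNewCells size S := by
  unfold pvStepB; exact PySem.Set.mem_union _ _ _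

def pvShape (N : Nat) (g : List (List Int)) : Prop :=
  g.length = N ∧ ∀ row ∈ g, row.length = N

theorem pv_render_length (size : Int) (S : PySem.Set (Int × Int)) :
    (pvRender size S).length = size.toNat := by
  unfold pvRender
  rw [List.length_map, PySem.List.length_pyRange_one]
  simp

theorem pv_render_shape (size : Int) (S : PySem.Set (Int × Int)) :
    pvShape size.toNat (pvRender size S) := by
  refine ⟨pv_render_length size S, ?_⟩
  intro row hrow
  unfold pvRender at hrow
  rw [List.mem_map] at hrow
  obtain ⟨y, _, rfl⟩ := hrow
  rw [List.length_map, PySem.List.length_pyRange_one]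
  simp

theorem pv_render_getElem (size : Int) (S : PySem.Set (Int × Int)) (i j : Nat)
    (hi : i < (pvRender size S).length)
    (hj : j < ((pvRender size S)[i]).length) :
    ((pvRender size S)[i])[j] = if PySem.Set.contains S ((i : Int), (j : Int)) then 1 else 0 := by
  have hi' : i < size.toNat := by rw [pv_render_length] at hi; exact hi
  have hj' : j < size.toNat := by
    have := (pv_render_shape size S).2 _ (List.getElem_mem hi)
    rw [this] at hj; exact hj
  unfold pvRender
  simp only [PySem.List.pyRange_one, List.getElem_map, List.getElem_range,
    Int.sub_zero] at *
  simp

theorem pv_entry_render (size : Int) (S : PySem.Set (Int × Int)) (y x : Int)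
    (hy : 0 ≤ y) (hys : y < size) (hx : 0 ≤ x) (hxs : x < size) :
    pvEntry (pvRender size S) y x = if PySem.Set.contains S (y, x) then 1 else 0 := by
  have hi : y.toNat < (pvRender size S).length := by rw [pv_render_length]; omega
  have hj : x.toNat < ((pvRender size S)[y.toNat]).length := by
    have := (pv_render_shape size S).2 _ (List.getElem_mem hi)
    rw [this]; omega
  unfold pvEntry
  rw [List.getD_eq_getElem _ _ hi, List.getD_eq_getElem _ _ hj,
    pv_render_getElem size S y.toNat x.toNat hi hj]
  have h1 : (y.toNat : Int) = y := by omega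
  have h2 : (x.toNat : Int) = x := by omega
  rw [h1, h2]

theorem pv_render_get (size : Int) (S : PySem.Set (Int × Int)) (y x : Int)
    (hy : 0 ≤ y) (hys : y < size) (hx : 0 ≤ x) (hxs : x < size) :
    ((PySem.List.pyGet? (pvRender size S) y).bind (fun row => PySem.List.pyGet? row x)) =
      some (if PySem.Set.contains S (y, x) then 1 else 0) := by
  have hi : y.toNat < (pvRender size S).length := by rw [pv_render_length]; omega
  have hj : x.toNat < ((pvRender size S)[y.toNat]).length := by
    have := (pv_render_shape size S).2 _ (List.getElem_mem hi)
    rw [this]; omega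
  rw [PySem.List.pyGet?_of_nonneg _ hy, List.getElem?_eq_getElem hi, Option.bind_some,
    PySem.List.pyGet?_of_nonneg _ hx, List.getElem?_eq_getElem hj,
    pv_render_getElem size S y.toNat x.toNat hi hj]
  have h1 : (y.toNat : Int) = y := by omega
  have h2 : (x.toNat : Int) = x := by omega
  rw [h1, h2]

theorem pv_isGiven_render (size : Int) (hsz : 0 ≤ size) (S : PySem.Set (Int × Int)) (y x : Int) :
    pvIsGiven (pvRender size S) y x = (pvInB size (y, x) && PySem.Set.contains S (y, x)) := by
  unfold pvIsGiven pvInB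
  have hlen : ((pvRender size S).length : Int) = size := by
    rw [pv_render_length]; omega
  rw [hlen]
  by_cases hy : 0 ≤ y
  · by_cases hys : y < size
    · by_cases hx : 0 ≤ x
      · by_cases hxs : x < size
        · simp only [hy, hys, hx, hxs, decide_true, Bool.true_and]
          rw [pv_render_get size S y x hy hys hx hxs]
          cases hc : PySem.Set.contains S (y, x) <;> simp
        · simp [hxs]
      · simp [hx]
    · simp [hys]
  · simp [hy]

def pvACount (size : Int) (S : PySem.Set (Int × Int)) (y x : Int) : Int :=
  ([((y-1, x) : Int × Int), (y+1, x), (y, x-1), (y, x+1)].map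
    (fun p => if pvInB size p && PySem.Set.contains S p then (1:Int) else 0)).sum

theorem pv_check1_render (size : Int) (hsz : 0 ≤ size) (S : PySem.Set (Int × Int)) (y x : Int) :
    pvCheck1 (pvRender size S) y x = (pvACount size S y x == 1) := by
  unfold pvCheck1 pvACount
  rw [pv_isGiven_render size hsz, pv_isGiven_render size hsz,
    pv_isGiven_render size hsz, pv_isGiven_render size hsz]
  rfl

theorem pv_inB_and_contains (size : Int) (S : PySem.Set (Int × Int))
    (h : pvGood size S) (p : Int × Int) :
    (pvInB size p && PySem.Set.contains S p) = PySem.Set.contains S p := by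
  cases hc : PySem.Set.contains S p
  · simp
  · rw [h p ((PySem.Set.contains_iff S p).mp hc)]; rfl

theorem pv_acount_eq_cnt (size : Int) (S : PySem.Set (Int × Int))
    (h : pvGood size S) (y x : Int) :
    pvACount size S y x = pvCnt S (y, x) := by
  unfold pvACount pvCnt pvDeltas
  simp only [List.map_cons, List.map_nil, List.sum_cons, List.sum_nil]
  rw [pv_inB_and_contains size S h, pv_inB_and_contains size S h,
    pv_inB_and_contains size S h, pv_inB_and_contains size S h]
  have e1 : ((y, x) : Int × Int).1 + (-1 : Int) = y - 1 := by simp; ring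
  have e3 : ((y, x) : Int × Int).2 + (-1 : Int) = x - 1 := by simp; ring
  simp only [e1, e3]
  norm_num

theorem pv_neg_delta : ∀ d ∈ pvDeltas, ((-d.1, -d.2) : Int × Int) ∈ pvDeltas := by decide

theorem pv_cnt_one_exists (S : PySem.Set (Int × Int)) (p : Int × Int) (h : pvCnt S p = 1) :
    ∃ d ∈ pvDeltas, PySem.Set.contains S (p.1 + d.1, p.2 + d.2) = true := by
  unfold pvCnt pvDeltas at h
  unfold pvDeltas
  simp only [List.map_cons, List.map_nil, List.sum_cons, List.sum_nil] at h
  cases h1 : PySem.Set.contains S (p.1 + -1, p.2 + 0)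
  · cases h2 : PySem.Set.contains S (p.1 + 1, p.2 + 0)
    · cases h3 : PySem.Set.contains S (p.1 + 0, p.2 + -1)
      · cases h4 : PySem.Set.contains S (p.1 + 0, p.2 + 1)
        · rw [h1, h2, h3, h4] at h; norm_num at h
        · exact ⟨(0, 1), by simp, h4⟩
      · exact ⟨(0, -1), by simp, h3⟩
    · exact ⟨(1, 0), by simp, h2⟩
  · exact ⟨(-1, 0), by simp, h1⟩

theorem pv_good_stepB (size : Int) (S : PySem.Set (Int × Int)) (h : pvGood size S) :
    pvGood size (pvStepB size S) := by
  intro p hp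
  rw [pv_mem_stepB] at hp
  rcases hp with hp | hp
  · exact h p hp
  · rw [pv_mem_newCells] at hp
    exact ((pv_mem_candidates size S p).mp hp.1).2.1

theorem pv_should_render (size : Int) (hsz : 0 ≤ size) (S : PySem.Set (Int × Int))
    (hgood : pvGood size S) (y x : Int)
    (hy : 0 ≤ y) (hys : y < size) (hx : 0 ≤ x) (hxs : x < size) :
    (pvShould (pvRender size S) y x = true) ↔ (y, x) ∈ pvStepB size S := by
  have hinB : pvInB size (y, x) = true := by
    unfold pvInB; simp only; rw [decide_eq_true hy, decide_eq_true hys,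
      decide_eq_true hx, decide_eq_true hxs]; rfl
  unfold pvShould
  rw [pv_isGiven_render size hsz, hinB, Bool.true_and]
  cases hc : PySem.Set.contains S (y, x)
  · simp only [Bool.false_eq_true, if_false]
    rw [pv_check1_render size hsz, pv_acount_eq_cnt size S hgood]
    have hnotmem : (y, x) ∉ S := by
      intro hm
      have := (PySem.Set.contains_iff S (y, x)).mpr hm
      rw [hc] at this
      exact Bool.false_ne_true this
    rw [pv_mem_stepB]
    constructor
    · intro hb
      have hcnt : pvCnt S (y, x) = 1 := by simpa using hb
      right
      rw [pv_mem_newCells]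
      refine ⟨?_, hcnt⟩
      obtain ⟨d, hd, hcon⟩ := pv_cnt_one_exists S (y, x) hcnt
      rw [pv_mem_candidates]
      refine ⟨⟨(y + d.1, x + d.2), (PySem.Set.contains_iff _ _).mp hcon,
        (-d.1, -d.2), pv_neg_delta d hd, ?_⟩, hinB, hnotmem⟩
      simp only [Prod.mk.injEq]
      constructor <;> ring
    · rintro (hm | hm)
      · exact absurd hm hnotmem
      · rw [pv_mem_newCells] at hm
        rw [hm.2]
        decide
  · simp only [if_true, true_iff]
    rw [pv_mem_stepB]
    exact Or.inl ((PySem.Set.contains_iff S (y, x)).mp hc)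

-- ---- setCell / fold-of-sets machinery ----
theorem pv_setCell_shape (N : Nat) (g : List (List Int)) (y x v : Int)
    (hy : 0 ≤ y) (hyN : y < (g.length : Int)) (h : pvShape N g) :
    pvShape N (pvSetCell g y x v) := by
  unfold pvSetCell
  rw [PySem.List.pySetD_of_nonneg _ _ hy]
  refine ⟨by rw [List.length_set]; exact h.1, ?_⟩
  intro row hr
  rcases List.mem_or_eq_of_mem_set hr with hmem | rfl
  · exact h.2 row hmem
  · rw [PySem.List.length_pySetD]
    have hyt : y.toNat < g.length := by omega
    rw [PySem.List.pyGetD_eq_getElem g [] hy hyN]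
    exact h.2 _ (List.getElem_mem hyt)

theorem pv_setCell_entry (g : List (List Int)) (y x v a b : Int)
    (hy : 0 ≤ y) (hyg : y < (g.length : Int))
    (hx : 0 ≤ x) (hxr : x < ((g.getD y.toNat []).length : Int))
    (ha : 0 ≤ a) (hb : 0 ≤ b) :
    pvEntry (pvSetCell g y x v) a b = if a = y ∧ b = x then v else pvEntry g a b := by
  have hyt : y.toNat < g.length := by omega
  have hrowl : g.getD y.toNat [] = g[y.toNat] := List.getD_eq_getElem g [] hyt
  have hxt : x.toNat < g[y.toNat].length := by rw [hrowl] at hxr; omega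
  unfold pvSetCell pvEntry
  rw [PySem.List.pySetD_of_nonneg _ _ hy, PySem.List.pySetD_of_nonneg _ _ hx,
    PySem.List.pyGetD_eq_getElem g [] hy hyg]
  by_cases hay : a = y
  · subst hay
    have hrowget : (g.set a.toNat (g[a.toNat].set x.toNat v)).getD a.toNat []
        = g[a.toNat].set x.toNat v := by
      rw [List.getD_eq_getElem _ _ (by rw [List.length_set]; exact hyt),
        List.getElem_set_self]
    rw [hrowget]
    by_cases hbx : b = x
    · subst hbx
      rw [if_pos ⟨rfl, rfl⟩,
        List.getD_eq_getElem _ _ (by rw [List.length_set]; exact hxt),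
        List.getElem_set_self]
    · rw [if_neg (by tauto)]
      rw [List.getD_eq_getElem?_getD, List.getElem?_set, if_neg (by omega),
        ← List.getD_eq_getElem?_getD, hrowl]
  · have hgget : (g.set y.toNat (g[y.toNat].set x.toNat v)).getD a.toNat []
        = g.getD a.toNat [] := by
      rw [List.getD_eq_getElem?_getD, List.getElem?_set, if_neg (by omega),
        ← List.getD_eq_getElem?_getD]
    rw [hgget, if_neg (by tauto)]

theorem pv_fold_entry (cond : Int × Int → Bool) (N : Nat) :
    ∀ (L : List (Int × Int)),
      (∀ p ∈ L, 0 ≤ p.1 ∧ p.1 < (N : Int) ∧ 0 ≤ p.2 ∧ p.2 < (N : Int)) →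
    ∀ g0 : List (List Int), pvShape N g0 →
      pvShape N (L.foldl (fun ng p => if cond p then pvSetCell ng p.1 p.2 1 else ng) g0) ∧
      ∀ a b : Int, 0 ≤ a → 0 ≤ b →
        pvEntry (L.foldl (fun ng p => if cond p then pvSetCell ng p.1 p.2 1 else ng) g0) a b
          = if (a, b) ∈ L ∧ cond (a, b) = true then 1 else pvEntry g0 a b := by
  intro L
  induction L with
  | nil => intro _ g0 hs; exact ⟨hs, by intro a b _ _; simp⟩
  | cons p t ih =>
      intro hmem g0 hs
      simp only [List.foldl_cons]
      have hp := hmem p (List.mem_cons_self)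
      have hs1 : pvShape N (if cond p then pvSetCell g0 p.1 p.2 1 else g0) := by
        by_cases hc : cond p
        · rw [if_pos hc]
          exact pv_setCell_shape N g0 p.1 p.2 1 hp.1 (by rw [hs.1]; exact hp.2.1) hs
        · rw [if_neg hc]; exact hs
      obtain ⟨hsh, hent⟩ := ih (fun q hq => hmem q (List.mem_cons_of_mem _ hq)) _ hs1
      refine ⟨hsh, ?_⟩
      intro a b ha hb
      rw [hent a b ha hb]
      have hge : pvEntry (if cond p then pvSetCell g0 p.1 p.2 1 else g0) a b
          = if (a, b) = p ∧ cond p = true then 1 else pvEntry g0 a b := by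
        by_cases hc : cond p
        · rw [if_pos hc]
          have hrow : ((g0.getD p.1.toNat []).length : Int) = (N : Int) := by
            have h1t : p.1.toNat < g0.length := by
              have := hs.1; omega
            rw [List.getD_eq_getElem g0 [] h1t]
            rw [hs.2 _ (List.getElem_mem h1t)]
          rw [pv_setCell_entry g0 p.1 p.2 1 a b hp.1 (by rw [hs.1]; exact hp.2.1)
            hp.2.2.1 (by rw [hrow]; exact hp.2.2.2) ha hb]
          by_cases hab : (a, b) = p
          · rw [if_pos (by rw [← hab]; exact ⟨rfl, rfl⟩), if_pos ⟨hab, hc⟩]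
          · have : ¬(a = p.1 ∧ b = p.2) := by
              intro ⟨h1, h2⟩; exact hab (by rw [h1, h2])
            rw [if_neg this, if_neg (by tauto)]
        · rw [if_neg hc, if_neg (by tauto)]
      rw [hge]
      by_cases h1 : (a, b) ∈ t ∧ cond (a, b) = true
      · rw [if_pos h1, if_pos ⟨List.mem_cons_of_mem _ h1.1, h1.2⟩]
      · rw [if_neg h1]
        by_cases h2 : (a, b) = p ∧ cond p = true
        · rw [if_pos h2, if_pos ⟨by rw [h2.1]; exact List.mem_cons_self, by rw [h2.1]; exact h2.2⟩]
        · rw [if_neg h2, if_neg ?_]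
          rintro ⟨hm, hcnd⟩
          rcases List.mem_cons.mp hm with heq | hm'
          · exact h2 ⟨heq, by rw [← heq]; exact hcnd⟩
          · exact h1 ⟨hm', hcnd⟩

theorem pv_foldl_flatten {γ : Type} (xs : List Int) (h : γ → Int → Int → γ) :
    ∀ (ys : List Int) (init : γ),
      ys.foldl (fun ng y => xs.foldl (fun ng2 x => h ng2 y x) ng) init
        = (ys.flatMap (fun y => xs.map (fun x => (y, x)))).foldl
            (fun ng p => h ng p.1 p.2) init := by
  intro ys
  induction ys with
  | nil => intro init; rfl
  | cons a t ih =>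
      intro init
      simp only [List.foldl_cons, List.flatMap_cons, List.foldl_append, List.foldl_map]
      rw [ih]

theorem pv_mem_coords (L a b : Int) :
    ((a, b) ∈ (PySem.List.pyRange 0 L 1).flatMap
        (fun y => (PySem.List.pyRange 0 L 1).map (fun x => (y, x)))) ↔
      (0 ≤ a ∧ a < L ∧ 0 ≤ b ∧ b < L) := by
  simp only [List.mem_flatMap, List.mem_map, PySem.List.mem_pyRange_one]
  constructor
  · rintro ⟨y, ⟨hy1, hy2⟩, x, ⟨hx1, hx2⟩, heq⟩
    obtain ⟨rfl, rfl⟩ := Prod.mk.injEq .. ▸ (Prod.mk.inj heq)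
    exact ⟨hy1, hy2, hx1, hx2⟩
  · rintro ⟨h1, h2, h3, h4⟩
    exact ⟨a, ⟨h1, h2⟩, b, ⟨h3, h4⟩, rfl⟩

theorem pv_entry_eq_getElem (g : List (List Int)) (i j : Nat)
    (hi : i < g.length) (hj : j < g[i].length) :
    pvEntry g (i : Int) (j : Int) = g[i][j] := by
  unfold pvEntry
  rw [Int.toNat_natCast, Int.toNat_natCast, List.getD_eq_getElem g [] hi,
    List.getD_eq_getElem _ _ hj]

theorem pv_stepA_render (size : Int) (hsz : 1 ≤ size) (S : PySem.Set (Int × Int))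
    (hgood : pvGood size S) :
    pvStepA (pvRender size S) = pvRender size (pvStepB size S) := by
  have hsz0 : 0 ≤ size := by omega
  have hshape := pv_render_shape size S
  have hlen : (((pvRender size S).length : Nat) : Int) = size := by
    rw [hshape.1]; omega
  unfold pvStepA
  rw [pv_foldl_flatten]
  have hmemb : ∀ p ∈ (PySem.List.pyRange 0 ((pvRender size S).length : Int) 1).flatMap
      (fun y => (PySem.List.pyRange 0 ((pvRender size S).length : Int) 1).map (fun x => (y, x))),
      0 ≤ p.1 ∧ p.1 < ((size.toNat : Nat) : Int) ∧ 0 ≤ p.2 ∧ p.2 < ((size.toNat : Nat) : Int) := by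
    intro p hp
    have := (pv_mem_coords ((pvRender size S).length : Int) p.1 p.2).mp (by
      have : ((p.1, p.2) : Int × Int) = p := rfl
      rw [this]; exact hp)
    rw [hlen] at this
    refine ⟨this.1, by omega, this.2.2.1, by omega⟩
  obtain ⟨hsh, hent⟩ := pv_fold_entry
    (fun p => pvShould (pvRender size S) p.1 p.2) size.toNat _ hmemb (pvRender size S) hshape
  apply List.ext_getElem
  · rw [hsh.1, pv_render_length]
  · intro i hi1 hi2
    apply List.ext_getElem
    · rw [hsh.2 _ (List.getElem_mem hi1),
        (pv_render_shape size (pvStepB size S)).2 _ (List.getElem_mem hi2)]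
    · intro j hj1 hj2
      have hiN : i < size.toNat := by rw [hsh.1] at hi1; exact hi1
      have hjN : j < size.toNat := by rw [hsh.2 _ (List.getElem_mem hi1)] at hj1; exact hj1
      rw [← pv_entry_eq_getElem _ i j hi1 hj1,
        pv_render_getElem size (pvStepB size S) i j hi2 hj2]
      rw [hent (i : Int) (j : Int) (by positivity) (by positivity)]
      have hmemc : ((i : Int), (j : Int)) ∈ (PySem.List.pyRange 0 ((pvRender size S).length : Int) 1).flatMap
          (fun y => (PySem.List.pyRange 0 ((pvRender size S).length : Int) 1).map (fun x => (y, x))) := by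
        rw [pv_mem_coords, hlen]
        refine ⟨by positivity, by omega, by positivity, by omega⟩
      have hib : (0:Int) ≤ i ∧ (i:Int) < size ∧ (0:Int) ≤ j ∧ (j:Int) < size :=
        ⟨by positivity, by omega, by positivity, by omega⟩
      by_cases hshf : pvShould (pvRender size S) (i : Int) (j : Int) = true
      · rw [if_pos ⟨hmemc, hshf⟩]
        have hmemS := (pv_should_render size hsz0 S hgood (i:Int) (j:Int)
          hib.1 hib.2.1 hib.2.2.1 hib.2.2.2).mp hshf
        rw [if_pos ((PySem.Set.contains_iff _ _).mpr hmemS)]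
      · rw [if_neg (by tauto)]
        have hnmemS : ((i:Int), (j:Int)) ∉ pvStepB size S := by
          intro hm
          exact hshf ((pv_should_render size hsz0 S hgood (i:Int) (j:Int)
            hib.1 hib.2.1 hib.2.2.1 hib.2.2.2).mpr hm)
        have hnS : ((i:Int), (j:Int)) ∉ S := fun hm =>
          hnmemS ((pv_mem_stepB size S _).mpr (Or.inl hm))
        rw [if_neg (fun hc => hnmemS ((PySem.Set.contains_iff _ _).mp hc))]
        rw [pv_entry_render size S (i:Int) (j:Int) hib.1 hib.2.1 hib.2.2.1 hib.2.2.2]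
        rw [if_neg (fun hc => hnS ((PySem.Set.contains_iff _ _).mp hc))]

-- ---- initial grid and the two loops ----
theorem pv_foldl_append_const {γ : Type} (r : γ) :
    ∀ (l : List Int) (init : List γ),
      l.foldl (fun g _ => g ++ [r]) init = init ++ List.replicate l.length r := by
  intro l
  induction l with
  | nil => intro init; simp
  | cons a t ih =>
      intro init
      simp only [List.foldl_cons, ih, List.length_cons, List.replicate_succ,
        List.append_assoc, List.singleton_append]

theorem pv_buildGrid_eq (size : Int) :
    pvBuildGrid size = List.replicate size.toNat (List.replicate size.toNat (0:Int)) := by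
  unfold pvBuildGrid
  rw [pv_foldl_append_const, List.nil_append, PySem.List.length_pyRange_one,
    List.map_const', PySem.List.length_pyRange_one]
  have hz : (size - 0).toNat = size.toNat := by omega
  rw [hz]

theorem pv_init (size c : Int) (h0 : 0 ≤ c) (hcs : c < size) :
    pvSetCell (pvBuildGrid size) c c 1 = pvRender size [((c, c) : Int × Int)] := by
  have hbg := pv_buildGrid_eq size
  have hshape0 : pvShape size.toNat (pvBuildGrid size) := by
    rw [hbg]
    exact ⟨List.length_replicate,
      fun row hr => by rw [List.eq_of_mem_replicate hr]; exact List.length_replicate⟩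
  have hlen0 : (((pvBuildGrid size).length : Nat) : Int) = size := by rw [hshape0.1]; omega
  have hshape : pvShape size.toNat (pvSetCell (pvBuildGrid size) c c 1) :=
    pv_setCell_shape _ _ _ _ _ h0 (by omega) hshape0
  apply List.ext_getElem
  · rw [hshape.1, pv_render_length]
  · intro i hi1 hi2
    apply List.ext_getElem
    · rw [hshape.2 _ (List.getElem_mem hi1), (pv_render_shape _ _).2 _ (List.getElem_mem hi2)]
    · intro j hj1 hj2
      have hiN : i < size.toNat := by rw [hshape.1] at hi1; exact hi1
      have hjN : j < size.toNat := by rw [hshape.2 _ (List.getElem_mem hi1)] at hj1; exact hj1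
      rw [← pv_entry_eq_getElem _ i j hi1 hj1, pv_render_getElem _ _ i j hi2 hj2]
      have hct : c.toNat < (pvBuildGrid size).length := by omega
      have hxr : c < (((pvBuildGrid size).getD c.toNat []).length : Int) := by
        rw [List.getD_eq_getElem _ _ hct, hshape0.2 _ (List.getElem_mem hct)]; omega
      rw [pv_setCell_entry _ c c 1 (i:Int) (j:Int) h0 (by omega) h0 hxr
        (by positivity) (by positivity)]
      have hent0 : pvEntry (pvBuildGrid size) (i:Int) (j:Int) = 0 := by
        unfold pvEntry
        rw [hbg, Int.toNat_natCast, Int.toNat_natCast]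
        rw [List.getD_eq_getElem _ _ (show i < _ by rw [List.length_replicate]; exact hiN)]
        rw [List.getElem_replicate]
        rw [List.getD_eq_getElem _ _ (show j < _ by rw [List.length_replicate]; exact hjN)]
        rw [List.getElem_replicate]
      rw [hent0]
      by_cases h : (i : Int) = c ∧ (j : Int) = c
      · rw [if_pos h, if_pos ?_]
        rw [PySem.Set.contains_iff]
        rw [h.1, h.2]
        exact List.mem_singleton.mpr rfl
      · rw [if_neg h, if_neg ?_]
        intro hc
        have := List.mem_singleton.mp ((PySem.Set.contains_iff _ _).mp hc)
        exact h ⟨congrArg Prod.fst this, congrArg Prod.snd this⟩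

theorem pv_iterB_eq (size : Int) :
    ∀ (k : Nat) (S : PySem.Set (Int × Int)),
      pvIterB size k S = (fun T => pvStepB size T)^[k] S := by
  intro k
  induction k with
  | zero => intro S; rfl
  | succ k ih => intro S; rw [pvIterB, ih, Function.iterate_succ_apply]

theorem pv_loop (size : Int) (hsz : 1 ≤ size) :
    ∀ (k : Nat) (S : PySem.Set (Int × Int)) (count n : Int),
      pvGood size S → count + (k : Int) = n + 1 →
      pvWhileA (pvRender size S) count n = pvRender size (pvIterB size k S) := by
  intro k
  induction k with
  | zero =>
      intro S count n hg hk
      rw [pvWhileA, if_neg (by omega)]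
      rfl
  | succ k ih =>
      intro S count n hg hk
      rw [pvWhileA, if_pos (by push_cast at hk; omega : count ≤ n),
        pv_stepA_render size hsz S hg,
        ih (pvStepB size S) (count+1) n (pv_good_stepB size S hg) (by push_cast at hk ⊢; omega)]
      rfl

theorem pv_alt_fold (size m : Int) (S : PySem.Set (Int × Int)) :
    (PySem.List.pyRange 0 m 1).foldl (fun f _ => pvStepB size f) S = pvIterB size m.toNat S := by
  rw [pv_foldl_const (fun f => pvStepB size f) _ S, PySem.List.length_pyRange_one,
    pv_iterB_eq]
  congr 1
  omega

-- ===== VERDICT (by name: the statement is the Claim_ definition above) =====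
theorem snowflake_spec : Claim_equal_snowflake := by
  unfold Claim_equal_snowflake Spec_snowflake
  intro n _hdom
  by_cases hn : n > 0
  · show snowflake n = snowflake_alt n
    unfold snowflake snowflake_alt
    rw [if_pos hn, if_neg (by omega)]
    have heq : n * 2 - 1 = 2 * n - 1 := by ring
    rw [heq]
    have hsz : (1:Int) ≤ 2 * n - 1 := by omega
    have hset : PySem.Set.add PySem.Set.empty ((n-1, n-1) : Int × Int) = [((n-1 : Int), (n-1 : Int))] := rfl
    have hgood : pvGood (2*n-1) [((n-1 : Int), (n-1 : Int))] := by
      intro p hp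
      have hpe : p = (n-1, n-1) := List.mem_singleton.mp hp
      rw [hpe]
      unfold pvInB
      rw [decide_eq_true (by omega : (0:Int) ≤ n-1), decide_eq_true (by omega : n-1 < 2*n-1)]
      rfl
    show pvWhileA (pvSetCell (pvBuildGrid (2*n-1)) (n-1) (n-1) 1) 2 n
        = pvRender (2*n-1) ((PySem.List.pyRange 0 (n-1) 1).foldl
            (fun f _ => pvStepB (2*n-1) f) (PySem.Set.add PySem.Set.empty (n-1, n-1)))
    rw [pv_init (2*n-1) (n-1) (by omega) (by omega),
      pv_loop (2*n-1) hsz (n-1).toNat [((n-1 : Int), (n-1 : Int))] 2 n hgood (by omega),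
      hset, pv_alt_fold (2*n-1) (n-1)]
  · show snowflake n = snowflake_alt n
    unfold snowflake snowflake_alt
    rw [if_neg hn, if_pos (by omega)]
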